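-- pv_equiv track=rewrite | github.com/jier/docsible | docsible/analyzers/complexity_analyzer.py | _detect_monitoring_platform
-- ===== SOURCE A (Python) =====
-- from typing import Dict, Any, List, Optional
--
-- def _detect_monitoring_platform(modules: List[str]) -> str:
--     """Detect specific monitoring platform from modules."""
--     if any("datadog" in m for m in modules):
--         return "Datadog"
--     elif any("prometheus" in m for m in modules):
--         return "Prometheus"
--     elif any("grafana" in m for m in modules):
--         return "Grafana"
--     elif any("newrelic" in m for m in modules):
--         return "New Relic"
--     elif any("nagios" in m for m in modules):
--         return "Nagios"
--     elif any("zabbix" in m for m in modules):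
--         return "Zabbix"
--     else:
--         return "Monitoring Platform"
-- ===== SOURCE B (Python) =====
-- _KEYWORDS = ["datadog", "prometheus", "grafana", "newrelic", "nagios", "zabbix"]
-- _LABELS = ["Datadog", "Prometheus", "Grafana", "New Relic", "Nagios", "Zabbix",
--            "Monitoring Platform"]
--
-- def _rank(m):
--     """Priority index of the best (lowest-index) keyword occurring in m; 6 if none."""
--     i = 0
--     for kw in _KEYWORDS:
--         if kw in m:
--             return i
--         i += 1
--     return len(_KEYWORDS)
--
-- def _detect_monitoring_platform(modules):
--     """Detect specific monitoring platform from modules."""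
--     best = len(_KEYWORDS)
--     for m in modules:
--         best = min(best, _rank(m))
--     return _LABELS[best]
-- ===== Notes on version B (the rewrite author's own statement) =====
-- stated objective: alternative
-- what changed: B replaces A's six any()-scans over the module list by a single fold over modules that minimises a numeric priority rank per module (each module is scanned once for its best keyword), then indexes a label table with the minimal rank.
import Mathlib
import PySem

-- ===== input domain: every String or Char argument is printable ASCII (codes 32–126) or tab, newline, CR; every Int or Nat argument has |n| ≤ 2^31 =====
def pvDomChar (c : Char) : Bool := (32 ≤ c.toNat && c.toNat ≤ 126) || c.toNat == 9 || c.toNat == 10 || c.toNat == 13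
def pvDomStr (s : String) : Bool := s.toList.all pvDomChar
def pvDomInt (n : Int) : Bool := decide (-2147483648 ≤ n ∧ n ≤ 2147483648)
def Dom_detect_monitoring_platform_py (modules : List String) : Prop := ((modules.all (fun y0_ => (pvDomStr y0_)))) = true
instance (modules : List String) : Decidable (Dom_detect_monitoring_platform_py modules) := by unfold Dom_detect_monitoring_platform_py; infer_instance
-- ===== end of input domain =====

-- B folds once over the modules, minimising a numeric priority rank computed per module,
-- then indexes a label table — instead of A's six separate any()-scans (alternative decomposition).

-- ===== PORT A =====
def detect_monitoring_platform_py (modules : List String) : String :=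
  if modules.any (fun m => PySem.Str.isIn "datadog" m) then "Datadog"
  else if modules.any (fun m => PySem.Str.isIn "prometheus" m) then "Prometheus"
  else if modules.any (fun m => PySem.Str.isIn "grafana" m) then "Grafana"
  else if modules.any (fun m => PySem.Str.isIn "newrelic" m) then "New Relic"
  else if modules.any (fun m => PySem.Str.isIn "nagios" m) then "Nagios"
  else if modules.any (fun m => PySem.Str.isIn "zabbix" m) then "Zabbix"
  else "Monitoring Platform"

-- ===== PORT B =====
def pvKeywords : List String := ["datadog", "prometheus", "grafana", "newrelic", "nagios", "zabbix"]
def pvLabels : List String :=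
  ["Datadog", "Prometheus", "Grafana", "New Relic", "Nagios", "Zabbix", "Monitoring Platform"]

-- _rank's loop: return index of first keyword contained in m, else the list length
def pvRankAux (m : String) : List String → Nat → Nat
  | [], i => i
  | kw :: rest, i => if PySem.Str.isIn kw m then i else pvRankAux m rest (i + 1)

def pvRank (m : String) : Nat := pvRankAux m pvKeywords 0

def detect_monitoring_platform_py_alt (modules : List String) : String :=
  let best := modules.foldl (fun b m => min b (pvRank m)) pvKeywords.length
  pvLabels.getD best "Monitoring Platform"

-- ===== PRECONDITION & SPEC =====
def Spec_detect_monitoring_platform_py (modules : List String) (out : String) : Prop := out = detect_monitoring_platform_py_alt modules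
instance (modules : List String) (out : String) : Decidable (Spec_detect_monitoring_platform_py modules out) := by unfold Spec_detect_monitoring_platform_py; infer_instance

-- ===== CLAIM (what is proved, stated in full; the proofs are below) =====
def Claim_equal_detect_monitoring_platform_py : Prop := ∀ (modules : List String), Dom_detect_monitoring_platform_py modules → Spec_detect_monitoring_platform_py modules (detect_monitoring_platform_py modules)

-- ===== LEMMAS AND PROOFS =====

-- the abstract priority chain over six booleans
def pvChain (a1 a2 a3 a4 a5 a6 : Bool) : Nat :=
  if a1 then 0 else if a2 then 1 else if a3 then 2 else if a4 then 3
  else if a5 then 4 else if a6 then 5 else 6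

lemma chain_min : ∀ (a1 a2 a3 a4 a5 a6 c1 c2 c3 c4 c5 c6 : Bool),
    min (pvChain a1 a2 a3 a4 a5 a6) (pvChain c1 c2 c3 c4 c5 c6) =
      pvChain (a1 || c1) (a2 || c2) (a3 || c3) (a4 || c4) (a5 || c5) (a6 || c6) := by
  decide

lemma rank_eq (m : String) :
    pvRank m = pvChain (PySem.Str.isIn "datadog" m) (PySem.Str.isIn "prometheus" m)
      (PySem.Str.isIn "grafana" m) (PySem.Str.isIn "newrelic" m)
      (PySem.Str.isIn "nagios" m) (PySem.Str.isIn "zabbix" m) := by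
  unfold pvRank pvKeywords pvChain
  simp only [pvRankAux]

-- the chain form of the minimal rank over modules
def pvG (ms : List String) : Nat :=
  pvChain (ms.any (fun m => PySem.Str.isIn "datadog" m)) (ms.any (fun m => PySem.Str.isIn "prometheus" m))
    (ms.any (fun m => PySem.Str.isIn "grafana" m)) (ms.any (fun m => PySem.Str.isIn "newrelic" m))
    (ms.any (fun m => PySem.Str.isIn "nagios" m)) (ms.any (fun m => PySem.Str.isIn "zabbix" m))

lemma chain_le : ∀ (a1 a2 a3 a4 a5 a6 : Bool), pvChain a1 a2 a3 a4 a5 a6 ≤ 6 := by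
  decide

lemma fold_eq (ms : List String) (b : Nat) (hb : b ≤ 6) :
    ms.foldl (fun b m => min b (pvRank m)) b = min b (pvG ms) := by
  induction ms generalizing b with
  | nil =>
    simp [pvG, pvChain]
    omega
  | cons m ms ih =>
    simp only [List.foldl_cons]
    rw [ih (min b (pvRank m)) (le_trans (min_le_left _ _) hb)]
    have h : min (pvRank m) (pvG ms) = pvG (m :: ms) := by
      rw [rank_eq, pvG, pvG, chain_min]
      simp [List.any_cons]
    rw [min_assoc, h]

-- ===== VERDICT (by name: the statement is the Claim_ definition above) =====
theorem detect_monitoring_platform_py_spec : Claim_equal_detect_monitoring_platform_py := by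
  intro modules _
  unfold Spec_detect_monitoring_platform_py detect_monitoring_platform_py detect_monitoring_platform_py_alt
  rw [show pvKeywords.length = 6 from rfl, fold_eq modules 6 le_rfl]
  show _ = pvLabels.getD (min 6 (pvG modules)) "Monitoring Platform"
  unfold pvG
  rw [min_eq_right (chain_le _ _ _ _ _ _)]
  unfold pvChain pvLabels
  split_ifs <;> rfl
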